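-- pv_equiv track=rewrite | github.com/themaanas/r-edact | reddit_post_guess.py | _is_nsfw
-- ===== SOURCE A (Python) =====
-- def _is_nsfw(text: str) -> bool:
--     if not text:
--         return False
--     lowered = text.lower()
--     return any(
--         token in lowered
--         for token in (
--             "nsfw",
--             "porn",
--             "sex ",
--             "sexual",
--             "explicit",
--             "nude",
--             "nudity",
--             "rape",
--             "gore",
--             "blood",
--             "violence",
--             "fuck",
--             "dick",
--             "pussy"
--         )
--     )
-- ===== SOURCE B (Python) =====
-- _TOKENS = (
--     "nsfw", "porn", "sex ", "sexual", "explicit", "nude", "nudity",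
--     "rape", "gore", "blood", "violence", "fuck", "dick", "pussy",
-- )
--
--
-- def _is_nsfw(text: str) -> bool:
--     lowered = text.lower()
--     for i in range(len(lowered)):
--         for token in _TOKENS:
--             if lowered.startswith(token, i):
--                 return True
--     return False
-- ===== Notes on version B (the rewrite author's own statement) =====
-- stated objective: alternative
-- what changed: B scans the lowered text position by position, checking at each index whether any keyword starts there (a naive multi-pattern matcher), instead of A's one full substring scan per keyword; the empty-text guard disappears since the position loop is vacuous.
import Mathlib
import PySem

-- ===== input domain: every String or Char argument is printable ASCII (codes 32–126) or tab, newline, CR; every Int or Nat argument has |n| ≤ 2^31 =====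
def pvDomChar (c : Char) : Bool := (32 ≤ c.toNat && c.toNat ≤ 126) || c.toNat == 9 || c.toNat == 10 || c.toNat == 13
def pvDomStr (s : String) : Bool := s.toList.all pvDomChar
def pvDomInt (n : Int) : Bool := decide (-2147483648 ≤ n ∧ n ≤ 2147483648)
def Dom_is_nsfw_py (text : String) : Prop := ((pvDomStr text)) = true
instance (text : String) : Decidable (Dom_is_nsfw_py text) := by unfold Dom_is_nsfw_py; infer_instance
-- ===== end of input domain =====

-- B replaces A's per-keyword substring scans by one position-major scan of the lowered
-- text that checks at each index whether any keyword starts there (objective: alternative).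


-- ===== PORT A =====
def pvTokensA : List String :=
  ["nsfw", "porn", "sex ", "sexual", "explicit", "nude", "nudity",
   "rape", "gore", "blood", "violence", "fuck", "dick", "pussy"]

def is_nsfw_py (text : String) : Bool :=
  if text.toList = [] then false
  else
    let lowered := PySem.Str.lower text
    pvTokensA.any (fun token => PySem.Str.isIn token lowered)

-- ===== PORT B =====
def pvTokensB : List (List Char) :=
  ["nsfw".toList, "porn".toList, "sex ".toList, "sexual".toList, "explicit".toList,
   "nude".toList, "nudity".toList, "rape".toList, "gore".toList, "blood".toList,
   "violence".toList, "fuck".toList, "dick".toList, "pussy".toList]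

-- Source B's 'for i in range(len(lowered))' with 'lowered.startswith(token, i)' is the
-- structural recursion over the successive nonempty suffixes of the lowered text;
-- 'startswith(token, i)' is exactly Chars.startswith on the suffix at i.
def pvScan (suffix : List Char) : Bool :=
  match suffix with
  | [] => false
  | c :: rest =>
      if pvTokensB.any (fun token => PySem.Chars.startswith (c :: rest) token) then true
      else pvScan rest

def is_nsfw_py_alt (text : String) : Bool :=
  pvScan (PySem.Chars.lower text.toList)

-- ===== PRECONDITION & SPEC =====
def Spec_is_nsfw_py (text : String) (out : Bool) : Prop := out = is_nsfw_py_alt text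
instance (text : String) (out : Bool) : Decidable (Spec_is_nsfw_py text out) := by unfold Spec_is_nsfw_py; infer_instance

-- ===== CLAIM (what is proved, stated in full; the proofs are below) =====
def Claim_equal_is_nsfw_py : Prop := ∀ (text : String), Dom_is_nsfw_py text → Spec_is_nsfw_py text (is_nsfw_py text)

-- ===== LEMMAS AND PROOFS =====

-- pvScan returns true iff some (nonempty) token occurs as a prefix of some suffix.
lemma pvScan_true_iff (l : List Char) :
    pvScan l = true ↔ ∃ t ∈ pvTokensB, ∃ j, t <+: l.drop j := by
  induction l with
  | nil =>
      simp only [pvScan]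
      constructor
      · intro h; exact absurd h (by simp)
      · rintro ⟨t, ht, j, hpre⟩
        simp only [List.drop_nil] at hpre
        have : t = [] := List.prefix_nil.mp hpre
        subst this
        revert ht; decide
  | cons c rest ih =>
      simp only [pvScan]
      by_cases h : pvTokensB.any (fun token => PySem.Chars.startswith (c :: rest) token) = true
      · simp only [h, if_true, true_iff]
        rcases List.any_eq_true.mp h with ⟨t, ht, hst⟩
        exact ⟨t, ht, 0, (PySem.Chars.startswith_iff _ _).mp hst⟩
      · rw [Bool.not_eq_true] at h
        simp only [h, Bool.false_eq_true, if_false]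
        rw [ih]
        constructor
        · rintro ⟨t, ht, j, hpre⟩
          exact ⟨t, ht, j + 1, by simpa using hpre⟩
        · rintro ⟨t, ht, j, hpre⟩
          cases j with
          | zero =>
              exfalso
              exact absurd (List.any_eq_true.mpr
                ⟨t, ht, (PySem.Chars.startswith_iff _ _).mpr (by simpa using hpre)⟩) (by simp [h])
          | succ k => exact ⟨t, ht, k, by simpa using hpre⟩

lemma pvScan_eq_any (l : List Char) :
    pvScan l = (pvTokensA.any (fun token => PySem.Chars.isIn token.toList l)) := by
  rcases Bool.eq_false_or_eq_true (pvScan l) with h | h <;> rw [h] <;> symm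
  · rw [pvScan_true_iff] at h
    rcases h with ⟨t, ht, j, hpre⟩
    rw [List.any_eq_true]
    have : ∃ s ∈ pvTokensA, s.toList = t := by
      revert ht; intro ht
      fin_cases ht <;> exact ⟨_, by decide, rfl⟩
    rcases this with ⟨s, hs, rfl⟩
    exact ⟨s, hs, (PySem.Chars.exists_prefix_drop_iff_isIn _ _).mp ⟨j, hpre⟩⟩
  · rw [List.any_eq_false]
    intro t ht
    rw [Bool.not_eq_true, PySem.Chars.isIn_eq_false_iff]
    intro hinf
    rcases List.infix_iff_prefix_suffix.mp hinf with ⟨s, hpre, hsuf⟩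
    have hj := List.suffix_iff_eq_drop.mp hsuf
    rw [hj] at hpre
    have hsc : pvScan l = true := by
      rw [pvScan_true_iff]
      refine ⟨t.toList, ?_, l.length - s.length, hpre⟩
      have : t ∈ pvTokensA := ht
      fin_cases this <;> decide
    rw [h] at hsc; exact absurd hsc (by simp)

lemma pvScan_nil_of_empty (text : String) (h : text.toList = []) :
    is_nsfw_py_alt text = false := by
  unfold is_nsfw_py_alt
  rw [h]
  rfl

-- ===== VERDICT (by name: the statement is the Claim_ definition above) =====
theorem is_nsfw_py_spec : Claim_equal_is_nsfw_py := by
  intro text _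
  unfold Spec_is_nsfw_py is_nsfw_py
  by_cases h : text.toList = []
  · rw [if_pos h, pvScan_nil_of_empty text h]
  · rw [if_neg h]
    unfold is_nsfw_py_alt
    rw [pvScan_eq_any]
    simp only [PySem.Str.isIn_eq, PySem.Str.toList_lower]
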